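-- pv_equiv track=rewrite | github.com/iicceeddssooddaa/LeetCode | #1385_Find_the_Distance_Value_Between_Two_Arrays.py | findTheDistanceValue
-- ===== SOURCE A (Python) =====
-- def findTheDistanceValue(arr1, arr2, d):
--     """
--     :type arr1: List[int]
--     :type arr2: List[int]
--     :type d: int
--     :rtype: int
--     """
--     arr2.sort()
--     n1, n2, count = len(arr1), len(arr2), 0
--     for i in range(n1):
--         if arr1[i] >= arr2[-1] and arr1[i] - arr2[-1] <= d: count += 1
--         elif arr1[i] <= arr2[0] and arr2[0] - arr1[i] <= d: count += 1
--         else: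
--             left, right = 0, n2 - 1
--             while left < right:
--                 mid = (left + right)//2
--                 if abs(arr1[i] - arr2[left]) <= d:
--                     right = left
--                 elif abs(arr1[i] - arr2[right]) <= d:
--                     left = right
--                 elif abs(arr1[i] - arr2[mid]) <= d:
--                     left, right = mid, mid
--                 elif arr1[i] < arr2[mid]: right = mid - 1
--                 elif arr1[i] > arr2[mid]: left = mid + 1
--             if abs(arr1[i] - arr2[left]) <= d and abs(arr1[i] - arr2[right]) <= d: count += 1
--     return n1 - count
-- ===== SOURCE B (Python) =====
-- def findTheDistanceValue(arr1, arr2, d):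
--     arr2.sort()
--     count = 0
--     for x in arr1:
--         hit = False
--         for y in arr2:
--             if y > x + d:
--                 break
--             if y >= x - d:
--                 hit = True
--                 break
--         if not hit:
--             count += 1
--     return count
-- ===== Notes on version B (the rewrite author's own statement) =====
-- stated objective: simpler
-- what changed: Replaces A's per-element hand-rolled binary search (with separate end-of-array special cases and a final two-sided check) by a single early-exit linear scan over the sorted arr2, counting the misses directly instead of subtracting the hits from len(arr1).
-- outside the precondition, e.g. on findTheDistanceValue([1], [0, 1], -1): A returns 1, B returns 1
import Mathlib
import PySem

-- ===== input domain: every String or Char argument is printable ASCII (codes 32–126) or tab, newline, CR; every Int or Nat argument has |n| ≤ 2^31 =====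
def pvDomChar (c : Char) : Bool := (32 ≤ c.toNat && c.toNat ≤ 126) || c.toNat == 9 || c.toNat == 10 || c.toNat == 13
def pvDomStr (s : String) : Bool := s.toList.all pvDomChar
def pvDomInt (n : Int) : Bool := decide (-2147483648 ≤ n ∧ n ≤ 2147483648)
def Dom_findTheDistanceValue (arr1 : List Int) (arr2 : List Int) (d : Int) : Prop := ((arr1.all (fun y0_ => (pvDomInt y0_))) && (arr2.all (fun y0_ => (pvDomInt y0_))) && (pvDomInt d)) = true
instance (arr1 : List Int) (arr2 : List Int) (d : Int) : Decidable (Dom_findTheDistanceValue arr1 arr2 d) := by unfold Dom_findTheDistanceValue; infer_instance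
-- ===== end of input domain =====

-- B replaces A's per-element hand-rolled binary search by an early-exit linear scan over the
-- sorted arr2 that counts the misses directly (objective: simpler). Both A and B sort arr2 in
-- place (same side effect); the equivalence proved here is about the return value.


-- ===== PORT A =====
-- arr2[i] (Python indexing, negative = from the end); under Pre_ every index A uses is in range,
-- so the .getD 0 default is never taken.
def pvGetA (l : List Int) (i : Int) : Int := (PySem.List.pyGet? l i).getD 0

-- A's 'while left < right' loop; fuel is only a totality guard (under Pre_ the interval shrinks
-- every iteration, so fuel = len + 2 is never exhausted). The final 'else' branch is Python
-- re-entering the loop with unchanged state (possible only when d < 0, excluded by Pre_).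
def loopA (x d : Int) (l : List Int) : Nat → Int → Int → Int × Int
  | 0, left, right => (left, right)
  | fuel + 1, left, right =>
    if left < right then
      let mid := PySem.Int.floordiv (left + right) 2
      if |x - pvGetA l left| ≤ d then loopA x d l fuel left left
      else if |x - pvGetA l right| ≤ d then loopA x d l fuel right right
      else if |x - pvGetA l mid| ≤ d then loopA x d l fuel mid mid
      else if x < pvGetA l mid then loopA x d l fuel left (mid - 1)
      else if x > pvGetA l mid then loopA x d l fuel (mid + 1) right
      else loopA x d l fuel left right
    else (left, right)

def findTheDistanceValue (arr1 : List Int) (arr2 : List Int) (d : Int) : Int :=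
  let a2 := PySem.List.sorted arr2 (fun x => x) false
  let n1 : Int := arr1.length
  let n2 : Int := a2.length
  let count := arr1.foldl (fun count x =>
    if x ≥ pvGetA a2 (-1) ∧ x - pvGetA a2 (-1) ≤ d then count + 1
    else if x ≤ pvGetA a2 0 ∧ pvGetA a2 0 - x ≤ d then count + 1
    else
      let lr := loopA x d a2 (a2.length + 2) 0 (n2 - 1)
      if |x - pvGetA a2 lr.1| ≤ d ∧ |x - pvGetA a2 lr.2| ≤ d then count + 1 else count) 0
  n1 - count

-- ===== PORT B =====
-- inner 'for y in arr2: …' with its two breaks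
def hitB (x d : Int) : List Int → Bool
  | [] => false
  | y :: ys => if y > x + d then false else if y ≥ x - d then true else hitB x d ys

def findTheDistanceValue_alt (arr1 : List Int) (arr2 : List Int) (d : Int) : Int :=
  let a2 := PySem.List.sorted arr2 (fun x => x) false
  arr1.foldl (fun count x => if hitB x d a2 then count else count + 1) 0

-- ===== PRECONDITION & SPEC =====
-- Pre_ excludes (a) empty arr2 with nonempty arr1, where A raises IndexError on arr2[-1], and
-- (b) negative d when some arr1 element also occurs in arr2, where A's search loop can re-enter
-- with unchanged state and never terminate (on the excluded negative-d inputs where the loop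
-- happens not to probe the shared value A terminates and agrees with B — see the cite).
def Pre_findTheDistanceValue (arr1 : List Int) (arr2 : List Int) (d : Int) : Prop :=
  (arr2 ≠ [] ∨ arr1 = []) ∧ (0 ≤ d ∨ ∀ x ∈ arr1, x ∉ arr2)
instance (arr1 : List Int) (arr2 : List Int) (d : Int) : Decidable (Pre_findTheDistanceValue arr1 arr2 d) := by unfold Pre_findTheDistanceValue; infer_instance
def pvWitness_findTheDistanceValue : List Int × List Int × Int := ([-2, 5], [1, 8], 2)

def Spec_findTheDistanceValue (arr1 : List Int) (arr2 : List Int) (d : Int) (out : Int) : Prop := out = findTheDistanceValue_alt arr1 arr2 d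
instance (arr1 : List Int) (arr2 : List Int) (d : Int) (out : Int) : Decidable (Spec_findTheDistanceValue arr1 arr2 d out) := by unfold Spec_findTheDistanceValue; infer_instance

-- ===== CLAIM (what is proved, stated in full; the proofs are below) =====
def Claim_equal_findTheDistanceValue : Prop := ∀ (arr1 : List Int) (arr2 : List Int) (d : Int), Dom_findTheDistanceValue arr1 arr2 d → Pre_findTheDistanceValue arr1 arr2 d → Spec_findTheDistanceValue arr1 arr2 d (findTheDistanceValue arr1 arr2 d)

-- ===== LEMMAS AND PROOFS =====

theorem pvGetA_eq {l : List Int} {i : Int} (h0 : 0 ≤ i) (h1 : i < (l.length : Int)) :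
    pvGetA l i = l[i.toNat]'(by omega) := by
  unfold pvGetA
  rw [PySem.List.pyGet?_of_nonneg l h0, List.getElem?_eq_getElem (by omega)]
  rfl

theorem pvGetA_mem {l : List Int} {i : Int} (h0 : 0 ≤ i) (h1 : i < (l.length : Int)) :
    pvGetA l i ∈ l := by
  rw [pvGetA_eq h0 h1]; exact List.getElem_mem _

theorem pvGetA_mono {l : List Int} (hp : l.Pairwise (· ≤ ·)) {i j : Int}
    (h0 : 0 ≤ i) (hij : i ≤ j) (hj : j < (l.length : Int)) :
    pvGetA l i ≤ pvGetA l j := by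
  rw [pvGetA_eq h0 (by omega), pvGetA_eq (by omega) hj]
  rcases eq_or_lt_of_le hij with h | h
  · simp [h]
  · exact List.pairwise_iff_getElem.mp hp _ _ (by omega) (by omega) (by omega)

theorem loopA_self (x d : Int) (l : List Int) (f : Nat) (a : Int) :
    loopA x d l f a a = (a, a) := by
  cases f <;> simp [loopA]

theorem absle (x g d : Int) : |x - g| ≤ d ↔ (x - d ≤ g ∧ g ≤ x + d) := by
  rw [abs_le]; omega

-- A's search loop is correct: if all candidate indices lie in [left, right], the final two-sided
-- check on the returned pair decides whether any element of l is within d of x.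
theorem loopA_correct (x d : Int) (l : List Int) (hd : 0 ≤ d) (hp : l.Pairwise (· ≤ ·)) :
    ∀ (fuel : Nat) (left right : Int), 0 ≤ left → left ≤ right → right ≤ (l.length : Int) - 1 →
    (right - left).toNat + 2 ≤ fuel →
    (∀ i : Int, 0 ≤ i → i < (l.length : Int) → (i < left ∨ right < i) → ¬ |x - pvGetA l i| ≤ d) →
    ((|x - pvGetA l (loopA x d l fuel left right).1| ≤ d ∧
      |x - pvGetA l (loopA x d l fuel left right).2| ≤ d) ↔
     (∃ i : Int, 0 ≤ i ∧ i < (l.length : Int) ∧ |x - pvGetA l i| ≤ d)) := by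
  intro fuel
  induction fuel with
  | zero => intro left right _ _ _ hfuel _; omega
  | succ f ih =>
    intro left right h0 h1 h2 hfuel hout
    rcases eq_or_lt_of_le h1 with heq | hlt
    · subst heq
      simp only [loopA, lt_irrefl]
      constructor
      · rintro ⟨ha, _⟩; exact ⟨left, h0, by omega, ha⟩
      · rintro ⟨i, hi0, hi1, hid⟩
        have hieq : i = left := by
          by_contra hne
          exact hout i hi0 hi1 (by omega) hid
        subst hieq; exact ⟨hid, hid⟩
    · have hmid := PySem.Int.floordiv_two_mid_bounds (le_of_lt hlt)
      have hmidlt : PySem.Int.floordiv (left + right) 2 < right := by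
        rw [PySem.Int.floordiv_lt_iff_lt_mul (by norm_num)]; omega
      simp only [loopA, if_pos hlt]
      set mid := PySem.Int.floordiv (left + right) 2 with hmiddef
      by_cases hb1 : |x - pvGetA l left| ≤ d
      · rw [if_pos hb1, loopA_self]
        exact ⟨fun _ => ⟨left, h0, by omega, hb1⟩, fun _ => ⟨hb1, hb1⟩⟩
      · rw [if_neg hb1]
        by_cases hb2 : |x - pvGetA l right| ≤ d
        · rw [if_pos hb2, loopA_self]
          exact ⟨fun _ => ⟨right, by omega, by omega, hb2⟩, fun _ => ⟨hb2, hb2⟩⟩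
        · rw [if_neg hb2]
          by_cases hb3 : |x - pvGetA l mid| ≤ d
          · rw [if_pos hb3, loopA_self]
            exact ⟨fun _ => ⟨mid, by omega, by omega, hb3⟩, fun _ => ⟨hb3, hb3⟩⟩
          · rw [if_neg hb3]
            by_cases hb4 : x < pvGetA l mid
            · rw [if_pos hb4]
              have hkey : x + d < pvGetA l mid := by
                rw [absle] at hb3; omega
              have hhigh : ∀ i : Int, 0 ≤ i → i < (l.length : Int) → mid ≤ i →
                  ¬ |x - pvGetA l i| ≤ d := by
                intro i hi0 hi1 hmi habs
                have hmono := pvGetA_mono hp (by omega : (0:Int) ≤ mid) hmi hi1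
                rw [absle] at habs; omega
              rcases eq_or_lt_of_le hmid.1 with hml | hml
              · have hret : loopA x d l f left (mid - 1) = (left, mid - 1) := by
                  cases f <;> simp [loopA, show ¬(left < mid - 1) by omega]
                rw [hret]
                constructor
                · rintro ⟨ha, _⟩; exact absurd ha hb1
                · rintro ⟨i, hi0, hi1, hid⟩
                  exfalso
                  by_cases hcase : i < left ∨ right < i
                  · exact hout i hi0 hi1 hcase hid
                  · exact hhigh i hi0 hi1 (by omega) hid
              · refine ih left (mid - 1) h0 (by omega) (by omega) (by omega) ?_
                intro i hi0 hi1 hc hid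
                by_cases hcase : i < left ∨ right < i
                · exact hout i hi0 hi1 hcase hid
                · exact hhigh i hi0 hi1 (by omega) hid
            · rw [if_neg hb4]
              by_cases hb5 : x > pvGetA l mid
              · rw [if_pos hb5]
                have hkey : pvGetA l mid < x - d := by
                  rw [absle] at hb3; omega
                have hlow : ∀ i : Int, 0 ≤ i → i < (l.length : Int) → i ≤ mid →
                    ¬ |x - pvGetA l i| ≤ d := by
                  intro i hi0 hi1 hmi habs
                  have hmono := pvGetA_mono hp hi0 hmi (by omega)
                  rw [absle] at habs; omega
                refine ih (mid + 1) right (by omega) (by omega) h2 (by omega) ?_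
                intro i hi0 hi1 hc hid
                by_cases hcase : i < left ∨ right < i
                · exact hout i hi0 hi1 hcase hid
                · exact hlow i hi0 hi1 (by omega) hid
              · exfalso
                apply hb3
                have hx : x = pvGetA l mid := by omega
                rw [absle]; omega

theorem pvGetA_neg_one {l : List Int} (hl : l ≠ []) :
    pvGetA l (-1) = pvGetA l ((l.length : Int) - 1) := by
  have hlen : 0 < l.length := List.length_pos_iff.mpr hl
  unfold pvGetA
  rw [PySem.List.pyGet?_neg_one, PySem.List.pyGet?_of_nonneg l (by omega),
    List.getLast?_eq_getElem?]
  have hnat : ((l.length : Int) - 1).toNat = l.length - 1 := by omega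
  rw [hnat]

-- bridge between value form ('some y ∈ l within d') and index form
theorem hit_val_idx (l : List Int) (x d : Int) :
    (∃ y ∈ l, |x - y| ≤ d) ↔ (∃ i : Int, 0 ≤ i ∧ i < (l.length : Int) ∧ |x - pvGetA l i| ≤ d) := by
  constructor
  · rintro ⟨y, hy, hyd⟩
    obtain ⟨k, hk, rfl⟩ := List.mem_iff_getElem.mp hy
    exact ⟨(k : Int), by positivity, by exact_mod_cast hk, by rwa [pvGetA_eq (by positivity) (by exact_mod_cast hk)]⟩
  · rintro ⟨i, h0, h1, hid⟩
    exact ⟨pvGetA l i, pvGetA_mem h0 h1, hid⟩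

-- B's scan is correct on a sorted list
theorem hitB_iff (x d : Int) : ∀ (l : List Int), l.Pairwise (· ≤ ·) →
    (hitB x d l = true ↔ ∃ y ∈ l, |x - y| ≤ d) := by
  intro l
  induction l with
  | nil => intro _; simp [hitB]
  | cons y ys ih =>
    intro hp
    rw [List.pairwise_cons] at hp
    by_cases h1 : y > x + d
    · simp only [hitB, if_pos h1]
      constructor
      · intro h; cases h
      · rintro ⟨z, hz, hzd⟩
        rcases List.mem_cons.mp hz with rfl | hz
        · rw [abs_le] at hzd; omega
        · have := hp.1 z hz
          rw [abs_le] at hzd; omega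
    · by_cases h2 : y ≥ x - d
      · simp only [hitB, if_neg h1, if_pos h2]
        constructor
        · intro _; exact ⟨y, List.mem_cons_self, by rw [abs_le]; omega⟩
        · intro _; trivial
      · simp only [hitB, if_neg h1, if_neg h2]
        rw [ih hp.2]
        constructor
        · rintro ⟨z, hz, hzd⟩; exact ⟨z, List.mem_cons_of_mem _ hz, hzd⟩
        · rintro ⟨z, hz, hzd⟩
          rcases List.mem_cons.mp hz with rfl | hz
          · rw [abs_le] at hzd; omega
          · exact ⟨z, hz, hzd⟩

-- per-element agreement: A's decision for one x equals B's scan on the sorted array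
theorem elem_eq (l : List Int) (d x : Int) (hl : l ≠ []) (hp : l.Pairwise (· ≤ ·)) :
    ((x ≥ pvGetA l (-1) ∧ x - pvGetA l (-1) ≤ d) ∨ (x ≤ pvGetA l 0 ∧ pvGetA l 0 - x ≤ d) ∨
      (|x - pvGetA l (loopA x d l (l.length + 2) 0 ((l.length : Int) - 1)).1| ≤ d ∧
       |x - pvGetA l (loopA x d l (l.length + 2) 0 ((l.length : Int) - 1)).2| ≤ d))
    ↔ hitB x d l = true := by
  have hlen : 0 < l.length := List.length_pos_iff.mpr hl
  rw [hitB_iff x d l hp, hit_val_idx]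
  by_cases hd : 0 ≤ d
  · have hloop := loopA_correct x d l hd hp (l.length + 2) 0 ((l.length : Int) - 1)
      le_rfl (by omega) (by omega) (by omega)
      (fun i hi0 hi1 hc _ => absurd hc (by omega))
    constructor
    · rintro (⟨ha, hb⟩ | ⟨ha, hb⟩ | h3)
      · refine ⟨(l.length : Int) - 1, by omega, by omega, ?_⟩
        rw [← pvGetA_neg_one hl, absle]; omega
      · exact ⟨0, le_rfl, by omega, by rw [absle]; omega⟩
      · exact hloop.mp h3
    · intro h
      exact Or.inr (Or.inr (hloop.mpr h))
  · constructor
    · rintro (⟨ha, hb⟩ | ⟨ha, hb⟩ | ⟨h3, _⟩)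
      · omega
      · omega
      · have := abs_nonneg (x - pvGetA l (loopA x d l (l.length + 2) 0 ((l.length : Int) - 1)).1)
        omega
    · rintro ⟨i, _, _, hid⟩
      have := abs_nonneg (x - pvGetA l i)
      omega

theorem main_fold (arr1 : List Int) (l : List Int) (d : Int) (hl : l ≠ [])
    (hp : l.Pairwise (· ≤ ·)) :
    (arr1.length : Int) - arr1.foldl (fun count x =>
      if x ≥ pvGetA l (-1) ∧ x - pvGetA l (-1) ≤ d then count + 1
      else if x ≤ pvGetA l 0 ∧ pvGetA l 0 - x ≤ d then count + 1
      else
        let lr := loopA x d l (l.length + 2) 0 ((l.length : Int) - 1)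
        if |x - pvGetA l lr.1| ≤ d ∧ |x - pvGetA l lr.2| ≤ d then count + 1 else count) 0
    = arr1.foldl (fun count x => if hitB x d l then count else count + 1) 0 := by
  rw [PySem.List.foldl_congr_mem arr1 _
    (fun count x => if hitB x d l then count + 1 else count) 0
    (by
      intro c y _
      have hiff := elem_eq l d y hl hp
      beta_reduce
      dsimp only
      by_cases h1 : y ≥ pvGetA l (-1) ∧ y - pvGetA l (-1) ≤ d
      · rw [if_pos h1, if_pos (hiff.mp (Or.inl h1))]
      · rw [if_neg h1]
        by_cases h2 : y ≤ pvGetA l 0 ∧ pvGetA l 0 - y ≤ d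
        · rw [if_pos h2, if_pos (hiff.mp (Or.inr (Or.inl h2)))]
        · rw [if_neg h2]
          by_cases h3 : |y - pvGetA l (loopA y d l (l.length + 2) 0 ((l.length : Int) - 1)).1| ≤ d ∧
              |y - pvGetA l (loopA y d l (l.length + 2) 0 ((l.length : Int) - 1)).2| ≤ d
          · rw [if_pos h3, if_pos (hiff.mp (Or.inr (Or.inr h3)))]
          · rw [if_neg h3, if_neg (fun hb : hitB y d l = true => by
              rcases hiff.mpr hb with h | h | h
              · exact h1 h
              · exact h2 h
              · exact h3 h)])]
  rw [PySem.List.foldl_congr_mem arr1 (fun count x => if hitB x d l then count else count + 1)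
    (fun count x => if !hitB x d l then count + 1 else count) 0
    (by intro c y _; by_cases hb : hitB y d l <;> simp [hb])]
  rw [PySem.List.foldl_if_add_one, PySem.List.foldl_if_add_one]
  have hc := List.length_eq_countP_add_countP (fun y => hitB y d l) (l := arr1)
  have hcongr : arr1.countP (fun y => !hitB y d l)
      = arr1.countP (fun a => decide ¬(fun y => hitB y d l) a = true) := by
    apply List.countP_congr
    intro a _
    by_cases hb : hitB a d l <;> simp [hb]
  rw [hcongr] at *
  omega

-- ===== VERDICT (by name: the statement is the Claim_ definition above) =====
theorem findTheDistanceValue_spec : Claim_equal_findTheDistanceValue := by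
  intro arr1 arr2 d _ hpre
  unfold Spec_findTheDistanceValue
  rcases hpre with ⟨h2, _⟩
  rcases h2 with h2 | rfl
  · have hl : PySem.List.sorted arr2 (fun x => x) false ≠ [] :=
      fun h => h2 ((PySem.List.sorted_eq_nil_iff arr2 (fun x => x) false).mp h)
    have hp : (PySem.List.sorted arr2 (fun x => x) false).Pairwise (· ≤ ·) :=
      PySem.List.sorted_pairwise arr2 (fun x => x)
    show findTheDistanceValue arr1 arr2 d = _
    unfold findTheDistanceValue findTheDistanceValue_alt
    simpa using main_fold arr1 (PySem.List.sorted arr2 (fun x => x) false) d hl hp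
  · simp [findTheDistanceValue, findTheDistanceValue_alt]
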